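-- pv_equiv track=rewrite | github.com/NellsonAss/JexidaMCP | jexida_dashboard/mcp_tools_core/tools/unifi/client.py | _classify_device_type
-- ===== SOURCE A (Python) =====
-- def _classify_device_type(unifi_type: str) -> str:
--     """Map UniFi device type to normalized type."""
--     type_map = {
--         "ugw": "gateway",
--         "udm": "gateway",
--         "usw": "switch",
--         "uap": "ap",
--     }
--     # Check prefix matches
--     for prefix, device_type in type_map.items():
--         if unifi_type.lower().startswith(prefix):
--             return device_type
--     return "other"
-- ===== SOURCE B (Python) =====
-- def _classify_device_type(unifi_type: str) -> str:
--     """Map UniFi device type to normalized type."""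
--     t = unifi_type.lower()
--     if len(t) < 3 or t[0] != 'u':
--         return "other"
--     mid, last = t[1], t[2]
--     if mid == 'g' and last == 'w':
--         return "gateway"
--     if mid == 'd' and last == 'm':
--         return "gateway"
--     if mid == 's' and last == 'w':
--         return "switch"
--     if mid == 'a' and last == 'p':
--         return "ap"
--     return "other"
-- ===== Notes on version B (the rewrite author's own statement) =====
-- stated objective: alternative
-- what changed: Replaced the table of prefixes scanned with startswith by a hard-coded character decision tree: one length/u-check on the first character, then direct comparisons of the second and third characters; no mapping structure and no substring operations remain.
import Mathlib
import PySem

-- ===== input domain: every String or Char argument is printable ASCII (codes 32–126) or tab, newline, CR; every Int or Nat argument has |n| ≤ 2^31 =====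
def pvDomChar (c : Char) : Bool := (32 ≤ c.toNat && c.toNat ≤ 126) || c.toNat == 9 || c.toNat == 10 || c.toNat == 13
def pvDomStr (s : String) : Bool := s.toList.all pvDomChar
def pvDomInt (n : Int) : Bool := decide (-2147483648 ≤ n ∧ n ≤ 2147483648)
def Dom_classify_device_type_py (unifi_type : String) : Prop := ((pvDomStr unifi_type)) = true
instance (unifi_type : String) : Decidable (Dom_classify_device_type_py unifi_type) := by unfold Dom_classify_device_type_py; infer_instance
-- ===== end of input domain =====

-- B replaces A's scan over a prefix→type map (startswith per key) by a hard-coded character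
-- decision tree on the first three lowercased characters (alternative decomposition, no map).

-- ===== PORT A =====
-- the for-loop over type_map.items(): first startswith match wins, fallthrough returns "other"
def classifyScan (l : String) : List (String × String) → String
  | [] => "other"
  | (pre, dt) :: rest => if PySem.Str.startswith l pre then dt else classifyScan l rest

def classify_device_type_py (unifi_type : String) : String :=
  let type_map : List (String × String) :=
    [("ugw", "gateway"), ("udm", "gateway"), ("usw", "switch"), ("uap", "ap")]
  classifyScan (PySem.Str.lower unifi_type) type_map

-- ===== PORT B =====
def classify_device_type_py_alt (unifi_type : String) : String :=
  let t := PySem.Str.lower unifi_type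
  if PySem.Str.len t < 3 || !(PySem.Str.pyGet? t 0 == some 'u') then "other"
  else
    let mid := PySem.Str.pyGet? t 1
    let last := PySem.Str.pyGet? t 2
    if mid == some 'g' && last == some 'w' then "gateway"
    else if mid == some 'd' && last == some 'm' then "gateway"
    else if mid == some 's' && last == some 'w' then "switch"
    else if mid == some 'a' && last == some 'p' then "ap"
    else "other"

-- ===== PRECONDITION & SPEC =====
def Spec_classify_device_type_py (unifi_type : String) (out : String) : Prop := out = classify_device_type_py_alt unifi_type
instance (unifi_type : String) (out : String) : Decidable (Spec_classify_device_type_py unifi_type out) := by unfold Spec_classify_device_type_py; infer_instance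

-- ===== CLAIM (what is proved, stated in full; the proofs are below) =====
def Claim_equal_classify_device_type_py : Prop := ∀ (unifi_type : String), Dom_classify_device_type_py unifi_type → Spec_classify_device_type_py unifi_type (classify_device_type_py unifi_type)

-- ===== LEMMAS AND PROOFS =====

-- both sides agree on the list of characters of an arbitrary (already lowercased) string
theorem scan_eq_tree_list (l : List Char) :
    (if "ugw".toList <+: l then "gateway"
     else if "udm".toList <+: l then "gateway"
     else if "usw".toList <+: l then "switch"
     else if "uap".toList <+: l then "ap" else "other")
    = (if (decide ((l.length : Int) < 3) || !PySem.List.pyGet? l 0 == some 'u') then "other"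
       else if PySem.List.pyGet? l 1 == some 'g' && PySem.List.pyGet? l 2 == some 'w' then "gateway"
       else if PySem.List.pyGet? l 1 == some 'd' && PySem.List.pyGet? l 2 == some 'm' then "gateway"
       else if PySem.List.pyGet? l 1 == some 's' && PySem.List.pyGet? l 2 == some 'w' then "switch"
       else if PySem.List.pyGet? l 1 == some 'a' && PySem.List.pyGet? l 2 == some 'p' then "ap"
       else "other") := by
  have hu : ("ugw" : String).toList = ['u','g','w'] := rfl
  have hd : ("udm" : String).toList = ['u','d','m'] := rfl
  have hs : ("usw" : String).toList = ['u','s','w'] := rfl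
  have hap : ("uap" : String).toList = ['u','a','p'] := rfl
  have pg0 : ∀ (x : Char) (l : List Char), PySem.List.pyGet? (x :: l) 0 = some x :=
    fun x l => PySem.List.pyGet?_zero_cons x l
  have pg1 : ∀ (x y : Char) (l : List Char), PySem.List.pyGet? (x :: y :: l) 1 = some y := by
    intro x y l
    rw [show (1 : Int) = ((1 : Nat) : Int) from rfl, PySem.List.pyGet?_natCast]; rfl
  have pg2 : ∀ (x y z : Char) (l : List Char), PySem.List.pyGet? (x :: y :: z :: l) 2 = some z := by
    intro x y z l
    rw [show (2 : Int) = ((2 : Nat) : Int) from rfl, PySem.List.pyGet?_natCast]; rfl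
  rcases l with _ | ⟨a, _ | ⟨b, _ | ⟨c, rest⟩⟩⟩
  · simp [hu, hd, hs, hap]
  · simp [hu, hd, hs, hap, List.cons_prefix_cons]
  · simp [hu, hd, hs, hap, List.cons_prefix_cons]
  · have hlen : (decide (((a :: b :: c :: rest).length : Int) < 3) || !PySem.List.pyGet? (a :: b :: c :: rest) 0 == some 'u')
        = !(a == 'u') := by
      simp [pg0]
      omega
    simp only [hu, hd, hs, hap, List.cons_prefix_cons, List.nil_prefix,
      hlen, pg1, pg2]
    by_cases ha : a = 'u'
    · subst ha
      have e1 : ('g' = b) ↔ (b = 'g') := eq_comm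
      have e2 : ('w' = c) ↔ (c = 'w') := eq_comm
      have e3 : ('d' = b) ↔ (b = 'd') := eq_comm
      have e4 : ('m' = c) ↔ (c = 'm') := eq_comm
      have e5 : ('s' = b) ↔ (b = 's') := eq_comm
      have e6 : ('a' = b) ↔ (b = 'a') := eq_comm
      have e7 : ('p' = c) ↔ (c = 'p') := eq_comm
      simp [e1, e2, e3, e4, e5, e6, e7]
    · have ha' : ¬ ('u' = a) := fun h => ha h.symm
      simp [ha, ha']


theorem scan_eq_tree (t : String) :
    classifyScan t [("ugw", "gateway"), ("udm", "gateway"), ("usw", "switch"), ("uap", "ap")]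
    = (if PySem.Str.len t < 3 || !(PySem.Str.pyGet? t 0 == some 'u') then "other"
       else
         let mid := PySem.Str.pyGet? t 1
         let last := PySem.Str.pyGet? t 2
         if mid == some 'g' && last == some 'w' then "gateway"
         else if mid == some 'd' && last == some 'm' then "gateway"
         else if mid == some 's' && last == some 'w' then "switch"
         else if mid == some 'a' && last == some 'p' then "ap"
         else "other") := by
  simp only [classifyScan, PySem.Str.startswith_eq, PySem.Chars.startswith_iff,
    PySem.Str.pyGet?_eq, PySem.Chars.pyGet?_eq_listPyGet?, PySem.Str.len_eq]
  exact scan_eq_tree_list t.toList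

-- ===== VERDICT (by name: the statement is the Claim_ definition above) =====
theorem classify_device_type_py_spec : Claim_equal_classify_device_type_py := by
  intro s _
  unfold Spec_classify_device_type_py classify_device_type_py classify_device_type_py_alt
  exact scan_eq_tree (PySem.Str.lower s)
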